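-- pv_equiv track=rewrite | github.com/javeo22/poke_comp | api/scripts/ingest/limitless_teams.py | determine_archetype
-- ===== SOURCE A (Python) =====
-- def determine_archetype(team_names: list[str]) -> str:
--     """Basic heuristic to determine team archetype based on composition."""
--     names_lower = {n.lower() for n in team_names}
--
--     if "pelipper" in names_lower or "politoed" in names_lower:
--         return "Rain"
--     if "torkoal" in names_lower or "mega charizard y" in names_lower:
--         return "Sun"
--     if "farigiraf" in names_lower or "hatterene" in names_lower or "porygon2" in names_lower:
--         return "Trick Room"
--     if "hippowdon" in names_lower or "tyranitar" in names_lower: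
--         return "Sand"
--     if "alolan ninetales" in names_lower or "abomasnow" in names_lower:
--         return "Snow"
--
--     return "Good Stuff / Balance"
-- ===== SOURCE B (Python) =====
-- _TRIGGER_RANK = {
--     "pelipper": 0, "politoed": 0,
--     "torkoal": 1, "mega charizard y": 1,
--     "farigiraf": 2, "hatterene": 2, "porygon2": 2,
--     "hippowdon": 3, "tyranitar": 3,
--     "alolan ninetales": 4, "abomasnow": 4,
-- }
--
-- _RANK_NAME = {0: "Rain", 1: "Sun", 2: "Trick Room", 3: "Sand", 4: "Snow"}
--
--
-- def determine_archetype(team_names: list[str]) -> str: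
--     """Basic heuristic to determine team archetype based on composition."""
--     best = 5
--     for n in team_names:
--         best = min(best, _TRIGGER_RANK.get(n.lower(), 5))
--     return _RANK_NAME.get(best, "Good Stuff / Balance")
-- ===== Notes on version B (the rewrite author's own statement) =====
-- stated objective: idiomatic
-- what changed: Replaced the five sequential OR-chain branches over a precomputed lowered-name set with a single pass over the team names that keeps the minimum priority rank from a trigger-name table, then maps the best rank to its archetype.
import Mathlib
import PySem

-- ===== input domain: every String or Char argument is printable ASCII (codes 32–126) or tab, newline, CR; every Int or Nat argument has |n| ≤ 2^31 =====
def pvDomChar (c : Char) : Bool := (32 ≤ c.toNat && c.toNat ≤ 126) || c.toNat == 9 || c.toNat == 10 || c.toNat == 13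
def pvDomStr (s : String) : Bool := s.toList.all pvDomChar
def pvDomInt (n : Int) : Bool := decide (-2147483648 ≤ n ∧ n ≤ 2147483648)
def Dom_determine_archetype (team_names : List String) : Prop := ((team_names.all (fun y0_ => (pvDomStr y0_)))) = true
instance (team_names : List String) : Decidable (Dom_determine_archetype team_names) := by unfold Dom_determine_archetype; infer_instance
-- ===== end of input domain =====

-- B replaces A's ordered OR-chain branches over a lowered-name set with one pass keeping
-- the minimum trigger-priority rank, then maps the best rank to its archetype (idiomatic).

-- ===== PORT A =====
def determine_archetype (team_names : List String) : String :=
  let names_lower : PySem.Set String := PySem.Set.ofList (team_names.map PySem.Str.lower)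
  if names_lower.contains "pelipper" || names_lower.contains "politoed" then "Rain"
  else if names_lower.contains "torkoal" || names_lower.contains "mega charizard y" then "Sun"
  else if names_lower.contains "farigiraf" || names_lower.contains "hatterene" || names_lower.contains "porygon2" then "Trick Room"
  else if names_lower.contains "hippowdon" || names_lower.contains "tyranitar" then "Sand"
  else if names_lower.contains "alolan ninetales" || names_lower.contains "abomasnow" then "Snow"
  else "Good Stuff / Balance"

-- ===== PORT B =====
def pvTriggerRank : PySem.Dict String Int :=
  PySem.Dict.ofList
    [("pelipper", 0), ("politoed", 0),
     ("torkoal", 1), ("mega charizard y", 1),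
     ("farigiraf", 2), ("hatterene", 2), ("porygon2", 2),
     ("hippowdon", 3), ("tyranitar", 3),
     ("alolan ninetales", 4), ("abomasnow", 4)]

def pvRankName : PySem.Dict Int String :=
  PySem.Dict.ofList [(0, "Rain"), (1, "Sun"), (2, "Trick Room"), (3, "Sand"), (4, "Snow")]

def determine_archetype_alt (team_names : List String) : String :=
  let best : Int :=
    team_names.foldl (fun b n => min b (pvTriggerRank.getD (PySem.Str.lower n) 5)) 5
  pvRankName.getD best "Good Stuff / Balance"

-- ===== PRECONDITION & SPEC =====
def Spec_determine_archetype (team_names : List String) (out : String) : Prop := out = determine_archetype_alt team_names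
instance (team_names : List String) (out : String) : Decidable (Spec_determine_archetype team_names out) := by unfold Spec_determine_archetype; infer_instance

-- ===== CLAIM (what is proved, stated in full; the proofs are below) =====
def Claim_equal_determine_archetype : Prop := ∀ (team_names : List String), Dom_determine_archetype team_names → Spec_determine_archetype team_names (determine_archetype team_names)

-- ===== LEMMAS AND PROOFS =====

-- rank of a (lowered) name in B's table, as an explicit if-chain
set_option maxHeartbeats 2000000 in
theorem pv_rank_eq (x : String) :
    pvTriggerRank.getD x 5 =
      if x = "pelipper" then 0 else if x = "politoed" then 0
      else if x = "torkoal" then 1 else if x = "mega charizard y" then 1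
      else if x = "farigiraf" then 2 else if x = "hatterene" then 2 else if x = "porygon2" then 2
      else if x = "hippowdon" then 3 else if x = "tyranitar" then 3
      else if x = "alolan ninetales" then 4 else if x = "abomasnow" then 4
      else 5 := by
  simp only [pvTriggerRank, PySem.Dict.ofList, PySem.Dict.update, PySem.Dict.getD_insert,
    PySem.Dict.getD_empty, List.foldl]
  split_ifs <;> simp_all

theorem pv_rank_nonneg (x : String) : 0 ≤ pvTriggerRank.getD x 5 := by
  rw [pv_rank_eq]; split_ifs <;> norm_num

-- characterization of the running-minimum fold
theorem pv_fold_le_iff (names : List String) (b k : Int) :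
    names.foldl (fun b n => min b (pvTriggerRank.getD (PySem.Str.lower n) 5)) b ≤ k ↔
      b ≤ k ∨ ∃ n ∈ names, pvTriggerRank.getD (PySem.Str.lower n) 5 ≤ k := by
  induction names generalizing b with
  | nil => simp
  | cons h t ih =>
      simp only [List.foldl_cons, ih, min_le_iff, List.mem_cons]
      constructor
      · rintro (⟨hb | hr⟩ | ⟨n, hn, hle⟩)
        · exact Or.inl hb
        · exact Or.inr ⟨h, Or.inl rfl, hr⟩
        · exact Or.inr ⟨n, Or.inr hn, hle⟩
      · rintro (hb | ⟨n, (rfl | hn), hle⟩)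
        · exact Or.inl (Or.inl hb)
        · exact Or.inl (Or.inr hle)
        · exact Or.inr ⟨n, hn, hle⟩

theorem pv_fold_nonneg (names : List String) (b : Int) (hb : 0 ≤ b) :
    0 ≤ names.foldl (fun b n => min b (pvTriggerRank.getD (PySem.Str.lower n) 5)) b := by
  induction names generalizing b with
  | nil => simpa
  | cons h t ih => exact ih _ (le_min hb (pv_rank_nonneg _))

-- rank ≤ k ↔ the name is one of the triggers of priority ≤ k
theorem pv_rank_le0 (x : String) : pvTriggerRank.getD x 5 ≤ 0 ↔ (x = "pelipper" ∨ x = "politoed") := by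
  rw [pv_rank_eq]; split_ifs <;> simp_all

theorem pv_rank_le1 (x : String) : pvTriggerRank.getD x 5 ≤ 1 ↔
    (x = "pelipper" ∨ x = "politoed" ∨ x = "torkoal" ∨ x = "mega charizard y") := by
  rw [pv_rank_eq]; split_ifs <;> simp_all

theorem pv_rank_le2 (x : String) : pvTriggerRank.getD x 5 ≤ 2 ↔
    (x = "pelipper" ∨ x = "politoed" ∨ x = "torkoal" ∨ x = "mega charizard y" ∨
     x = "farigiraf" ∨ x = "hatterene" ∨ x = "porygon2") := by
  rw [pv_rank_eq]; split_ifs <;> simp_all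

theorem pv_rank_le3 (x : String) : pvTriggerRank.getD x 5 ≤ 3 ↔
    (x = "pelipper" ∨ x = "politoed" ∨ x = "torkoal" ∨ x = "mega charizard y" ∨
     x = "farigiraf" ∨ x = "hatterene" ∨ x = "porygon2" ∨ x = "hippowdon" ∨ x = "tyranitar") := by
  rw [pv_rank_eq]; split_ifs <;> simp_all

theorem pv_rank_le4 (x : String) : pvTriggerRank.getD x 5 ≤ 4 ↔
    (x = "pelipper" ∨ x = "politoed" ∨ x = "torkoal" ∨ x = "mega charizard y" ∨
     x = "farigiraf" ∨ x = "hatterene" ∨ x = "porygon2" ∨ x = "hippowdon" ∨ x = "tyranitar" ∨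
     x = "alolan ninetales" ∨ x = "abomasnow") := by
  rw [pv_rank_eq]; split_ifs <;> simp_all

-- membership in A's lowered-name set as an existential over team_names
theorem pv_mem_lower (team_names : List String) (x : String) :
    PySem.Set.contains (PySem.Set.ofList (team_names.map PySem.Str.lower)) x = true ↔
      ∃ n ∈ team_names, PySem.Str.lower n = x := by
  rw [PySem.Set.contains_iff, PySem.Set.mem_ofList, List.mem_map]

-- ===== VERDICT (by name: the statement is the Claim_ definition above) =====
set_option maxHeartbeats 4000000 in
theorem determine_archetype_spec : Claim_equal_determine_archetype := by
  intro team_names _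
  unfold Spec_determine_archetype determine_archetype
  simp only [determine_archetype_alt]
  set best : Int :=
    team_names.foldl (fun b n => min b (pvTriggerRank.getD (PySem.Str.lower n) 5)) 5 with hbest
  have hle : ∀ k : Int, best ≤ k ↔
      (5 : Int) ≤ k ∨ ∃ n ∈ team_names, pvTriggerRank.getD (PySem.Str.lower n) 5 ≤ k := by
    intro k; rw [hbest]; exact pv_fold_le_iff _ _ _
  have hnn : 0 ≤ best := by rw [hbest]; exact pv_fold_nonneg _ _ (by norm_num)
  have hub : best ≤ 5 := by rw [hle]; exact Or.inl le_rfl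
  have key : ∀ k : Int, ∀ n ∈ team_names,
      pvTriggerRank.getD (PySem.Str.lower n) 5 ≤ k → best ≤ k :=
    fun k n hn h => (hle k).mpr (Or.inr ⟨n, hn, h⟩)
  have notkey : ∀ k : Int, k < 5 →
      (∀ n ∈ team_names, ¬ pvTriggerRank.getD (PySem.Str.lower n) 5 ≤ k) → ¬ best ≤ k := by
    intro k hk h hc
    rcases (hle k).mp hc with h5 | ⟨n, hn, hr⟩
    · omega
    · exact h n hn hr
  simp only [Bool.or_eq_true, pv_mem_lower]
  split_ifs with h1 h2 h3 h4 h5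
  · -- Rain: some trigger of rank 0 present, so best = 0
    have hb0 : best ≤ 0 := by
      rcases h1 with ⟨n, hn, hx⟩ | ⟨n, hn, hx⟩
      · exact key 0 n hn ((pv_rank_le0 _).mpr (Or.inl hx))
      · exact key 0 n hn ((pv_rank_le0 _).mpr (Or.inr hx))
    have : best = 0 := le_antisymm hb0 hnn
    rw [this]; rfl
  · -- Sun: best = 1
    have hb1 : best ≤ 1 := by
      rcases h2 with ⟨n, hn, hx⟩ | ⟨n, hn, hx⟩
      · exact key 1 n hn ((pv_rank_le1 _).mpr (Or.inr (Or.inr (Or.inl hx))))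
      · exact key 1 n hn ((pv_rank_le1 _).mpr (Or.inr (Or.inr (Or.inr hx))))
    have hn0 : ¬ best ≤ 0 := by
      refine notkey 0 (by norm_num) ?_
      intro n hn hr
      push_neg at h1
      rcases (pv_rank_le0 _).mp hr with hx | hx
      · exact h1.1 n hn hx
      · exact h1.2 n hn hx
    have : best = 1 := by omega
    rw [this]; rfl
  · -- Trick Room: best = 2
    have hb2 : best ≤ 2 := by
      rcases h3 with (⟨n, hn, hx⟩ | ⟨n, hn, hx⟩) | ⟨n, hn, hx⟩
      · exact key 2 n hn ((pv_rank_le2 _).mpr (Or.inr (Or.inr (Or.inr (Or.inr (Or.inl hx))))))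
      · exact key 2 n hn ((pv_rank_le2 _).mpr (Or.inr (Or.inr (Or.inr (Or.inr (Or.inr (Or.inl hx)))))))
      · exact key 2 n hn ((pv_rank_le2 _).mpr (Or.inr (Or.inr (Or.inr (Or.inr (Or.inr (Or.inr hx)))))))
    have hn1 : ¬ best ≤ 1 := by
      refine notkey 1 (by norm_num) ?_
      intro n hn hr
      push_neg at h1 h2
      rcases (pv_rank_le1 _).mp hr with hx | hx | hx | hx
      · exact h1.1 n hn hx
      · exact h1.2 n hn hx
      · exact h2.1 n hn hx
      · exact h2.2 n hn hx
    have : best = 2 := by omega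
    rw [this]; rfl
  · -- Sand: best = 3
    have hb3 : best ≤ 3 := by
      rcases h4 with ⟨n, hn, hx⟩ | ⟨n, hn, hx⟩
      · exact key 3 n hn ((pv_rank_le3 _).mpr (Or.inr (Or.inr (Or.inr (Or.inr (Or.inr (Or.inr (Or.inr (Or.inl hx)))))))))
      · exact key 3 n hn ((pv_rank_le3 _).mpr (Or.inr (Or.inr (Or.inr (Or.inr (Or.inr (Or.inr (Or.inr (Or.inr hx)))))))))
    have hn2 : ¬ best ≤ 2 := by
      refine notkey 2 (by norm_num) ?_
      intro n hn hr
      push_neg at h1 h2 h3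
      rcases (pv_rank_le2 _).mp hr with hx | hx | hx | hx | hx | hx | hx
      · exact h1.1 n hn hx
      · exact h1.2 n hn hx
      · exact h2.1 n hn hx
      · exact h2.2 n hn hx
      · exact h3.1.1 n hn hx
      · exact h3.1.2 n hn hx
      · exact h3.2 n hn hx
    have : best = 3 := by omega
    rw [this]; rfl
  · -- Snow: best = 4
    have hb4 : best ≤ 4 := by
      rcases h5 with ⟨n, hn, hx⟩ | ⟨n, hn, hx⟩
      · exact key 4 n hn ((pv_rank_le4 _).mpr (Or.inr (Or.inr (Or.inr (Or.inr (Or.inr (Or.inr (Or.inr (Or.inr (Or.inr (Or.inl hx)))))))))))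
      · exact key 4 n hn ((pv_rank_le4 _).mpr (Or.inr (Or.inr (Or.inr (Or.inr (Or.inr (Or.inr (Or.inr (Or.inr (Or.inr (Or.inr hx)))))))))))
    have hn3 : ¬ best ≤ 3 := by
      refine notkey 3 (by norm_num) ?_
      intro n hn hr
      push_neg at h1 h2 h3 h4
      rcases (pv_rank_le3 _).mp hr with hx | hx | hx | hx | hx | hx | hx | hx | hx
      · exact h1.1 n hn hx
      · exact h1.2 n hn hx
      · exact h2.1 n hn hx
      · exact h2.2 n hn hx
      · exact h3.1.1 n hn hx
      · exact h3.1.2 n hn hx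
      · exact h3.2 n hn hx
      · exact h4.1 n hn hx
      · exact h4.2 n hn hx
    have : best = 4 := by omega
    rw [this]; rfl
  · -- Good Stuff / Balance: best = 5
    have hn4 : ¬ best ≤ 4 := by
      refine notkey 4 (by norm_num) ?_
      intro n hn hr
      push_neg at h1 h2 h3 h4 h5
      rcases (pv_rank_le4 _).mp hr with hx | hx | hx | hx | hx | hx | hx | hx | hx | hx | hx
      · exact h1.1 n hn hx
      · exact h1.2 n hn hx
      · exact h2.1 n hn hx
      · exact h2.2 n hn hx
      · exact h3.1.1 n hn hx
      · exact h3.1.2 n hn hx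
      · exact h3.2 n hn hx
      · exact h4.1 n hn hx
      · exact h4.2 n hn hx
      · exact h5.1 n hn hx
      · exact h5.2 n hn hx
    have : best = 5 := by omega
    rw [this]; rfl
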